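-- pv_equiv track=rewrite | github.com/eridur-de/mightyscape-1.2 | extensions/fablabchemnitz/path_intersections/path_intersections.py | take_N
-- ===== SOURCE A (Python) =====
-- def take_N(seq, n):
--     """
--     split ``seq`` into slices of length ``n``. the total
--     length of ``seq` must be a multiple of ``n``.
--     """
--     if len(seq) % n != 0:
--         raise ValueError("len=%d, n=%d, (%s)" % (len(seq), n, seq))
--     sub = []
--     for elem in seq:
--         sub.append(elem)
--         if len(sub) == n:
--             yield sub
--             sub = []
-- ===== SOURCE B (Python) =====
-- def take_N(seq, n):
--     """
--     split ``seq`` into slices of length ``n``. the total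
--     length of ``seq` must be a multiple of ``n``.
--     """
--     if len(seq) % n != 0:
--         raise ValueError("len=%d, n=%d, (%s)" % (len(seq), n, seq))
--     for i in range(0, len(seq), n):
--         yield list(seq[i:i+n])
-- ===== Notes on version B (the rewrite author's own statement) =====
-- stated objective: idiomatic
-- what changed: Replaces the running-accumulator element loop (append, yield and reset when the chunk fills) with a direct iteration over start indices via range(0, len(seq), n), yielding each slice seq[i:i+n]; no accumulator state is kept.
import Mathlib
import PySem

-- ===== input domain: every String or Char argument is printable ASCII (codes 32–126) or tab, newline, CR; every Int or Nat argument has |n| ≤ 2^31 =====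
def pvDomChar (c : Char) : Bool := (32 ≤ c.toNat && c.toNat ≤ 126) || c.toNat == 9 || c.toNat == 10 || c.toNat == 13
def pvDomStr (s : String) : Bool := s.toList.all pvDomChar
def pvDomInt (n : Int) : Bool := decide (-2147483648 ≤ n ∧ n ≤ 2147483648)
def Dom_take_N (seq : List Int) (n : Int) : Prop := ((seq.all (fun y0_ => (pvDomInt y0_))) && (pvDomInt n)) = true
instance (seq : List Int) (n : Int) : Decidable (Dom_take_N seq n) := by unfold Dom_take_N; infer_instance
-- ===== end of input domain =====

-- B iterates over chunk start indices with range(0, len, n) and slices, instead of A's running accumulator that fills, yields and resets; same cost, more idiomatic.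


-- ===== PORT A =====
-- A is a generator; it is ported as the list of all yielded chunks.
def take_N (seq : List Int) (n : Int) : List (List Int) :=
  (seq.foldl
    (fun (st : List (List Int) × List Int) elem =>
      let sub := st.2 ++ [elem]
      if (sub.length : Int) = n then (st.1 ++ [sub], ([] : List Int)) else (st.1, sub))
    (([] : List (List Int)), ([] : List Int))).1

-- ===== PORT B =====
def take_N_alt (seq : List Int) (n : Int) : List (List Int) :=
  (PySem.List.pyRange 0 (seq.length : Int) n).map
    (fun i => PySem.List.slice seq (some i) (some (i + n)))

-- ===== PRECONDITION & SPEC =====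
-- Pre_ excludes exactly the inputs where A raises: n = 0 (ZeroDivisionError) and
-- len(seq) % n != 0 (ValueError).
def Pre_take_N (seq : List Int) (n : Int) : Prop :=
  n ≠ 0 ∧ PySem.Int.mod (seq.length : Int) n = 0
instance (seq : List Int) (n : Int) : Decidable (Pre_take_N seq n) := by
  unfold Pre_take_N; infer_instance
def pvWitness_take_N : List Int × Int := ([1, 2, 3, 4], 2)
def Spec_take_N (seq : List Int) (n : Int) (out : List (List Int)) : Prop := out = take_N_alt seq n
instance (seq : List Int) (n : Int) (out : List (List Int)) : Decidable (Spec_take_N seq n out) := by unfold Spec_take_N; infer_instance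

-- ===== CLAIM (what is proved, stated in full; the proofs are below) =====
def Claim_equal_take_N : Prop := ∀ (seq : List Int) (n : Int), Dom_take_N seq n → Pre_take_N seq n → Spec_take_N seq n (take_N seq n)

-- ===== LEMMAS AND PROOFS =====

-- A's loop body, named for the proofs (definitionally the fold body of `take_N`).
def pvF (n : Int) (st : List (List Int) × List Int) (elem : Int) : List (List Int) × List Int :=
  let sub := st.2 ++ [elem]
  if (sub.length : Int) = n then (st.1 ++ [sub], ([] : List Int)) else (st.1, sub)

theorem take_N_eq_foldl (seq : List Int) (n : Int) :
    take_N seq n = (seq.foldl (pvF n) (([] : List (List Int)), ([] : List Int))).1 := rfl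

-- the common shape: chunks of size m, q of them
def pvChunks (m : Nat) : Nat → List Int → List (List Int)
  | 0, _ => []
  | q + 1, seq => seq.take m :: pvChunks m q (seq.drop m)

theorem pvF_acc (n : Int) (seq : List Int) : ∀ (acc : List (List Int)) (sub : List Int),
    List.foldl (pvF n) (acc, sub) seq
      = (acc ++ (List.foldl (pvF n) (([] : List (List Int)), sub) seq).1,
         (List.foldl (pvF n) (([] : List (List Int)), sub) seq).2) := by
  induction seq with
  | nil => intro acc sub; simp
  | cons e rest ih =>
    intro acc sub
    simp only [List.foldl_cons, pvF]
    by_cases h : (((sub ++ [e]).length : Int) = n)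
    · simp only [if_pos h]
      rw [ih (acc ++ [sub ++ [e]]) [], ih ([] ++ [sub ++ [e]]) []]
      simp
    · simp only [if_neg h]
      exact ih acc (sub ++ [e])

theorem pvF_build (n : Int) (hn : 0 < n) : ∀ (seq sub : List Int) (acc : List (List Int)),
    sub.length < n.toNat → sub.length + seq.length = n.toNat →
    List.foldl (pvF n) (acc, sub) seq = (acc ++ [sub ++ seq], ([] : List Int)) := by
  intro seq
  induction seq with
  | nil => intro sub acc hlt heq; simp at heq; omega
  | cons e rest ih =>
    intro sub acc hlt heq
    simp only [List.foldl_cons, pvF]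
    by_cases hrest : rest = []
    · subst hrest
      have hc : ((sub.length : Int)) + 1 = n := by
        simp at heq; omega
      simp [hc]
    · have hr : 0 < rest.length := List.length_pos_iff.mpr hrest
      have hlt' : (sub ++ [e]).length < n.toNat := by simp at heq ⊢; omega
      have hcond : ¬ (((sub ++ [e]).length : Int) = n) := by
        intro h; omega
      simp only [if_neg hcond]
      rw [ih (sub ++ [e]) acc hlt' (by simp at heq ⊢; omega)]
      simp

theorem A_eq_chunks (m : Nat) (hm : 0 < m) : ∀ (q : Nat) (seq : List Int),
    seq.length = m * q → take_N seq (m : Int) = pvChunks m q seq := by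
  intro q
  induction q with
  | zero =>
    intro seq h
    have : seq = [] := List.length_eq_zero_iff.mp (by omega)
    subst this
    rfl
  | succ q ih =>
    intro seq h
    have hmle : m ≤ seq.length := by rw [h, Nat.mul_succ]; omega
    have ht : (seq.take m).length = m := by simp [List.length_take]; omega
    have hd : (seq.drop m).length = m * q := by
      simp [List.length_drop, h, Nat.mul_succ]
    have hseq : seq = seq.take m ++ seq.drop m := (List.take_append_drop m seq).symm
    rw [take_N_eq_foldl]
    conv_lhs => rw [hseq]
    rw [List.foldl_append]
    rw [pvF_build (m : Int) (by exact_mod_cast hm) (seq.take m) [] []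
        (by simpa using hm) (by simpa using ht)]
    rw [pvF_acc]
    have hrec : (List.foldl (pvF (m : Int)) (([] : List (List Int)), ([] : List Int)) (seq.drop m)).1
        = pvChunks m q (seq.drop m) := by
      rw [← take_N_eq_foldl]; exact ih _ hd
    simp [pvChunks, hrec]

theorem pyRange_chunk (m q : Nat) (hm : 0 < m) :
    PySem.List.pyRange 0 ((m * q : Nat) : Int) (m : Int)
      = (List.range q).map (fun k => ((m * k : Nat) : Int)) := by
  have hmpos : (0 : Int) < (m : Int) := by exact_mod_cast hm
  rw [PySem.List.pyRange_of_pos 0 ((m * q : Nat) : Int) hmpos]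
  have hcount : (if (0 : Int) < ((m * q : Nat) : Int)
      then ((((m * q : Nat) : Int) - 0 + (m : Int) - 1) / (m : Int)).toNat else 0) = q := by
    by_cases hq : q = 0
    · subst hq; simp
    · have hq0 : 0 < q := Nat.pos_of_ne_zero hq
      have hpos : (0 : Int) < ((m * q : Nat) : Int) := by
        exact_mod_cast Nat.mul_pos hm hq0
      rw [if_pos hpos]
      have : (((m * q : Nat) : Int) - 0 + (m : Int) - 1) = ((m : Int) - 1) + (q : Int) * (m : Int) := by
        push_cast; ring
      rw [this, Int.add_mul_ediv_right _ _ (by omega : (m : Int) ≠ 0)]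
      rw [Int.ediv_eq_zero_of_lt (by omega) (by omega)]
      simp
  rw [hcount]
  apply List.map_congr_left
  intro k _
  push_cast
  ring
theorem mapChunks (m : Nat) : ∀ (q : Nat) (seq : List Int),
    (List.range q).map (fun k => (seq.drop (m * k)).take m) = pvChunks m q seq := by
  intro q
  induction q with
  | zero => intro seq; simp [pvChunks]
  | succ q ih =>
    intro seq
    rw [List.range_succ_eq_map, List.map_cons, List.map_map]
    have hcomp : ∀ k ∈ List.range q,
        ((fun k => (seq.drop (m * k)).take m) ∘ Nat.succ) k
          = (fun k => (((seq.drop m).drop (m * k)).take m)) k := by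
      intro k _
      simp only [Function.comp, List.drop_drop]
      congr 2
      rw [Nat.succ_eq_add_one]
      ring
    rw [List.map_congr_left hcomp, ih (seq.drop m)]
    simp [pvChunks]

theorem B_eq_chunks (m : Nat) (hm : 0 < m) (q : Nat) (seq : List Int)
    (h : seq.length = m * q) : take_N_alt seq (m : Int) = pvChunks m q seq := by
  unfold take_N_alt
  rw [show ((seq.length : Int)) = ((m * q : Nat) : Int) by exact_mod_cast h]
  rw [pyRange_chunk m q hm, List.map_map]
  have hsl : ∀ k ∈ List.range q,
      ((fun i => PySem.List.slice seq (some i) (some (i + (m : Int)))) ∘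
        (fun k : Nat => ((m * k : Nat) : Int))) k
        = (fun k => (seq.drop (m * k)).take m) k := by
    intro k _
    simp only [Function.comp]
    rw [show ((m * k : Nat) : Int) + (m : Int) = ((m * k : Nat) : Int) + ((m : Nat) : Int) by norm_num,
        PySem.List.slice_natCast_add seq (m * k) m]
  rw [List.map_congr_left hsl, mapChunks m q seq]

theorem A_neg (n : Int) (hn : n < 0) (seq : List Int) : ∀ (acc : List (List Int)) (sub : List Int),
    (List.foldl (pvF n) (acc, sub) seq).1 = acc := by
  induction seq with
  | nil => intro acc sub; rfl
  | cons e rest ih =>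
    intro acc sub
    simp only [List.foldl_cons, pvF]
    have hcond : ¬ (((sub ++ [e]).length : Int) = n) := by
      intro h
      have : (0 : Int) ≤ ((sub ++ [e]).length : Int) := by positivity
      omega
    simp only [if_neg hcond]
    exact ih acc (sub ++ [e])

-- ===== VERDICT (by name: the statement is the Claim_ definition above) =====
theorem take_N_spec : Claim_equal_take_N := by
  intro seq n _ hpre
  obtain ⟨hn0, hmod⟩ := hpre
  unfold Spec_take_N
  have hdvd : n ∣ (seq.length : Int) := (PySem.Int.mod_eq_zero_iff_dvd _ _).mp hmod
  rcases lt_or_gt_of_ne hn0 with hneg | hpos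
  · -- n < 0: A yields nothing, B's range is empty
    rw [take_N_eq_foldl, A_neg n hneg seq [] []]
    unfold take_N_alt
    rw [show PySem.List.pyRange 0 (seq.length : Int) n = [] by
      simp only [PySem.List.pyRange, if_neg hn0]
      rw [if_neg (by omega : ¬ (0 : Int) < n), if_neg (by omega : ¬ (seq.length : Int) < 0)]
      simp]
    simp
  · -- n > 0
    set m : Nat := n.toNat with hmdef
    have hnm : n = (m : Int) := by omega
    have hm : 0 < m := by omega
    have hdvd' : m ∣ seq.length := by
      rw [hnm] at hdvd
      exact_mod_cast hdvd
    obtain ⟨q, hq⟩ := hdvd'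
    rw [hnm, A_eq_chunks m hm q seq hq, B_eq_chunks m hm q seq hq]
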